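-- pv_equiv track=rewrite | github.com/yashgori20/AZSwiftCheck | workflow_engine.py | get_next_stage
-- ===== SOURCE A (Python) =====
-- def get_next_stage(current_stage, approval_chain):
--     """Get next required stage in approval chain"""
--     stage_order = [stage["stage"] for stage in approval_chain]
--
--     try:
--         current_index = stage_order.index(current_stage)
--
--         # Find next required stage
--         for i in range(current_index + 1, len(approval_chain)):
--             if approval_chain[i]["required"]:
--                 return approval_chain[i]["stage"]
--
--         return None  # No more required stages
--
--     except ValueError:
--         return None
-- ===== SOURCE B (Python) =====
-- def get_next_stage(current_stage, approval_chain):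
--     """Get next required stage in approval chain (single flag-driven pass)."""
--     found = False
--     for stage in approval_chain:
--         if found:
--             if stage["required"]:
--                 return stage["stage"]
--         elif stage["stage"] == current_stage:
--             found = True
--     return None
-- ===== Notes on version B (the rewrite author's own statement) =====
-- stated objective: simpler
-- what changed: Replaces A's three phases (build a stage-name table, locate current_stage with list.index inside try/except, then index-scan forward) by one flag-driven pass over approval_chain that flips 'found' at the first matching stage and returns the first required stage after it.
import Mathlib
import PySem

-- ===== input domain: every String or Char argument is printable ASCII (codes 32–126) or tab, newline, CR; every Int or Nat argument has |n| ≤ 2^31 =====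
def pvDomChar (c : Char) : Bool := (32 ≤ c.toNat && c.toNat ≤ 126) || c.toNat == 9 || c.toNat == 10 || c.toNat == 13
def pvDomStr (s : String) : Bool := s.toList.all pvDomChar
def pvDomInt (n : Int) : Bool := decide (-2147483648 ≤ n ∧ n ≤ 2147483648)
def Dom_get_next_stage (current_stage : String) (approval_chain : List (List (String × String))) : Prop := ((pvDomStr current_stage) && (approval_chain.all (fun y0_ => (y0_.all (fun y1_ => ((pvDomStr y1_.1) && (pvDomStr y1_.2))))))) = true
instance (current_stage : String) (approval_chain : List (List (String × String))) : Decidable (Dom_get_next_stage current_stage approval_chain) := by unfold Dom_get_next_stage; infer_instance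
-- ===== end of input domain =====

-- B replaces A's table-build + list.index + forward index-scan by one flag-driven pass; objective: simpler.

-- d[k] for the assoc-list dict (first match); Pre_ guarantees every key the scans read is present,
-- so the "" default is never returned on admitted inputs
def pvKey (d : List (String × String)) (k : String) : String := (d.lookup k).getD ""

-- ===== PORT A =====
def get_next_stage (current_stage : String) (approval_chain : List (List (String × String))) : Option String :=
  let stage_order := approval_chain.map (fun stage => pvKey stage "stage")
  match PySem.List.index? stage_order current_stage with
  | none => none    -- except ValueError: return None
  | some current_index =>
    -- for i in range(current_index + 1, len(approval_chain)): if approval_chain[i]["required"]: return …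
    (PySem.List.pyRange ((current_index : Int) + 1) (approval_chain.length : Int) 1).findSome?
      (fun i =>
        let d := PySem.List.pyGetD approval_chain i []
        if pvKey d "required" ≠ "" then some (pvKey d "stage") else none)

-- ===== PORT B =====
def pvAltGo (current_stage : String) (chain : List (List (String × String))) (found : Bool) : Option String :=
  match chain with
  | [] => none
  | stage :: rest =>
    if found then
      if pvKey stage "required" ≠ "" then some (pvKey stage "stage")
      else pvAltGo current_stage rest true
    else pvAltGo current_stage rest (pvKey stage "stage" == current_stage)

def get_next_stage_alt (current_stage : String) (approval_chain : List (List (String × String))) : Option String :=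
  pvAltGo current_stage approval_chain false

-- ===== PRECONDITION & SPEC =====
-- Pre_ excludes exactly the inputs on which Python A raises KeyError: a dict without the key "stage"
-- (A's comprehension reads it in every dict), or — when current_stage occurs at position ci — a dict at
-- position j > ci missing the key "required" that A's forward scan actually reaches (every dict strictly
-- between ci and j carries "required" with a falsy value, i.e. "").
-- Bool form so decidability is immediate; read && / || / ! as and / or / not.
def pvPreB (c : String) (chain : List (List (String × String))) : Bool :=
  -- every dict has the key "stage" …
  chain.all (fun d => (d.lookup "stage").isSome) &&
  -- … and if ci is the first position whose "stage" is c, then any position j > ci that the forward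
  -- scan reaches (all dicts strictly between carry "required" with falsy value "") has the key "required"
  ((List.range chain.length).all fun ci =>
    !(((chain.getD ci []).lookup "stage" == some c) &&
      ((List.range ci).all fun k => !((chain.getD k []).lookup "stage" == some c))) ||
    ((List.range chain.length).all fun j =>
      !(decide (ci < j)) ||
      !((List.range j).all fun k => !(decide (ci < k)) || ((chain.getD k []).lookup "required" == some "")) ||
      ((chain.getD j []).lookup "required").isSome))

def Pre_get_next_stage (current_stage : String) (approval_chain : List (List (String × String))) : Prop :=
  pvPreB current_stage approval_chain = true
instance (current_stage : String) (approval_chain : List (List (String × String))) : Decidable (Pre_get_next_stage current_stage approval_chain) := by unfold Pre_get_next_stage; infer_instance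

def pvWitness_get_next_stage : String × (List (List (String × String))) :=
  ("a", [[("stage", "a"), ("required", "y")], [("stage", "b"), ("required", "y")]])

def Spec_get_next_stage (current_stage : String) (approval_chain : List (List (String × String))) (out : Option String) : Prop := out = get_next_stage_alt current_stage approval_chain
instance (current_stage : String) (approval_chain : List (List (String × String))) (out : Option String) : Decidable (Spec_get_next_stage current_stage approval_chain out) := by unfold Spec_get_next_stage; infer_instance

-- ===== CLAIM (what is proved, stated in full; the proofs are below) =====
def Claim_equal_get_next_stage : Prop := ∀ (current_stage : String) (approval_chain : List (List (String × String))), Dom_get_next_stage current_stage approval_chain → Pre_get_next_stage current_stage approval_chain → Spec_get_next_stage current_stage approval_chain (get_next_stage current_stage approval_chain)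

-- ===== LEMMAS AND PROOFS =====

-- A's forward scan body, abstracted
def pvReq (d : List (String × String)) : Option String :=
  if pvKey d "required" ≠ "" then some (pvKey d "stage") else none

-- once found = true, B is exactly findSome? pvReq on the rest of the chain
theorem pvAltGo_true (c : String) (chain : List (List (String × String))) :
    pvAltGo c chain true = chain.findSome? pvReq := by
  induction chain with
  | nil => rfl
  | cons d rest ih =>
    simp only [pvAltGo, List.findSome?, pvReq]
    by_cases h : pvKey d "required" ≠ "" <;> simp [h, ih]

-- B with found = false computes A's "index then scan the tail" result
theorem pvAltGo_false (c : String) (chain : List (List (String × String))) :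
    pvAltGo c chain false =
      match PySem.List.index? (chain.map (fun d => pvKey d "stage")) c with
      | none => none
      | some ci => (chain.drop (ci + 1)).findSome? pvReq := by
  induction chain with
  | nil => rfl
  | cons d rest ih =>
    by_cases h : pvKey d "stage" = c
    · simp only [pvAltGo, h, beq_self_eq_true, if_neg (Bool.false_ne_true), pvAltGo_true]
      rw [List.map_cons, h, PySem.List.index?_cons_self]
      simp
    · have hb : (pvKey d "stage" == c) = false := by simpa using h
      simp only [pvAltGo, hb, if_neg (Bool.false_ne_true)]
      rw [ih, List.map_cons, PySem.List.index?_cons_of_ne _ h]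
      cases PySem.List.index? (rest.map (fun d => pvKey d "stage")) c with
      | none => rfl
      | some ci => simp

-- A's index-driven range scan is findSome? pvReq over the dropped chain
theorem pvScan_eq (chain : List (List (String × String))) (a : Int) (ha : 0 ≤ a) :
    (PySem.List.pyRange a (chain.length : Int) 1).findSome?
        (fun i => pvReq (PySem.List.pyGetD chain i [])) =
      (chain.drop a.toNat).findSome? pvReq := by
  rw [← PySem.List.map_pyGetD_pyRange' chain [] ha, List.findSome?_map]
  rfl

-- ===== VERDICT (by name: the statement is the Claim_ definition above) =====
theorem get_next_stage_spec : Claim_equal_get_next_stage := by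
  intro c chain _ _
  unfold Spec_get_next_stage get_next_stage get_next_stage_alt
  rw [pvAltGo_false]
  show (match PySem.List.index? (chain.map (fun d => pvKey d "stage")) c with
    | none => none
    | some current_index =>
      (PySem.List.pyRange ((current_index : Int) + 1) (chain.length : Int) 1).findSome?
        (fun i => pvReq (PySem.List.pyGetD chain i []))) = _
  cases h : PySem.List.index? (chain.map (fun d => pvKey d "stage")) c with
  | none => rfl
  | some ci =>
    show (PySem.List.pyRange ((ci : Int) + 1) (chain.length : Int) 1).findSome?
        (fun i => pvReq (PySem.List.pyGetD chain i [])) =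
      (chain.drop (ci + 1)).findSome? pvReq
    rw [pvScan_eq chain ((ci : Int) + 1) (by positivity)]
    congr 1
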